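-- pv_equiv track=rewrite | github.com/BAH-HA/AdventOfCode | 2024/day_05/day_05_p2.py | is_correct_update
-- ===== SOURCE A (Python) =====
-- def is_correct_update(page_order_map, update):
--     printed_pages = set()
--     pages_to_be_printed = set(update.split(','))
--     pages = update.split(',')
--     safe = True
--
--     for page in pages:
--         if page_order_map.get(int(page)):
--             for page_num in page_order_map.get(int(page)):
--                 if str(page_num) in pages_to_be_printed:
--                     if page_num not in printed_pages:
--                         safe = False
--                         break
--                 printed_pages.add(int(page))
--         else:
--             printed_pages.add(int(page))
--
--     return safe
-- ===== SOURCE B (Python) =====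
-- def is_correct_update(page_order_map, update):
--     pages = update.split(',')
--     vals = [int(p) for p in pages]
--     n = len(vals)
--     present = set(pages)
--     # first position of each page value in the update
--     first_pos = {}
--     for i, v in enumerate(vals):
--         first_pos.setdefault(v, i)
--     # earliest position whose constraint list mentions k
--     first_req = {}
--     for i, v in enumerate(vals):
--         for k in page_order_map.get(v) or ():
--             first_req.setdefault(k, i)
--     # k is demanded from position first_req[k] on; it must already be printed by then
--     return all(str(k) not in present or first_pos.get(k, n) < i
--                for k, i in first_req.items())
-- ===== Notes on version B (the rewrite author's own statement) =====
-- stated objective: alternative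
-- what changed: A scans the update page by page, maintaining a printed-pages set online and breaking out of the constraint scan with a safe flag; B inverts the loops into staged table-building passes: it builds a first-occurrence position table for values and a table of the earliest position demanding each constrained value, then decides with one pass over the distinct demanded values comparing the two indices.
-- outside the precondition, e.g. on is_correct_update({5: [3, 5]}, '5'): A returns True, B returns False
import Mathlib
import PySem

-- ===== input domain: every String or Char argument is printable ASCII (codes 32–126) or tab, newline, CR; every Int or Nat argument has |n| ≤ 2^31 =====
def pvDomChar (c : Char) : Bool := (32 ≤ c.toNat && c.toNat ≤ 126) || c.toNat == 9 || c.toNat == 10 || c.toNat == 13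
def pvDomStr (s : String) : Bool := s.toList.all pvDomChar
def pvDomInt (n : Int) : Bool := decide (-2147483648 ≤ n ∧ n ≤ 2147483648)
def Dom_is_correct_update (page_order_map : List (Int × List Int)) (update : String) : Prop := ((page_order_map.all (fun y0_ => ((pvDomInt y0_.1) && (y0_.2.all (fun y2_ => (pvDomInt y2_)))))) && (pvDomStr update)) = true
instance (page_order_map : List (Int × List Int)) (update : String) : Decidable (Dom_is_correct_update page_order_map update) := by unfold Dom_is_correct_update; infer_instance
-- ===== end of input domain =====

-- B replaces A's online printed-pages set (with its mid-scan add and break/flag bookkeeping)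
-- by staged table-building passes: a first-occurrence position table and an earliest-demand
-- table, decided by one pass over the distinct demanded values (objective: alternative).


-- shared by both ports: int(s) — Pre_ guarantees the parse succeeds (Python raises ValueError otherwise)
def pvIntOf (s : String) : Int := (PySem.Int.ofStr? s).getD 0
-- shared by both ports: update.split(',') — the separator is nonempty, so split? is always some
def pvSplit (update : String) : List String := (PySem.Str.split? update ",").getD []

-- ===== PORT A =====
-- inner 'for page_num in page_order_map.get(int(page))' loop: break on an unprinted required
-- page that is part of the update; otherwise printed_pages.add(int(page)) and continue
def aInner (pset : PySem.Set String) (v : Int) : List Int → PySem.Set Int → PySem.Set Int × Bool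
  | [], printed => (printed, true)
  | k :: rest, printed =>
    if PySem.Set.contains pset (PySem.Int.toStr k) && !(PySem.Set.contains printed k) then
      (printed, false)
    else
      aInner pset v rest (PySem.Set.add printed v)

-- outer 'for page in pages' loop, state = (printed_pages, safe)
def aLoop (d : PySem.Dict Int (List Int)) (pset : PySem.Set String) :
    List String → PySem.Set Int → Bool → Bool
  | [], _, safe => safe
  | page :: rest, printed, safe =>
    let v := pvIntOf page
    match PySem.Dict.get? d v with
    | some L =>
      if L.isEmpty then aLoop d pset rest (PySem.Set.add printed v) safe
      else
        let r := aInner pset v L printed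
        aLoop d pset rest r.1 (if r.2 then safe else false)
    | none => aLoop d pset rest (PySem.Set.add printed v) safe

def is_correct_update (page_order_map : List (Int × List Int)) (update : String) : Bool :=
  let pages := pvSplit update
  let pset := PySem.Set.ofList pages
  aLoop (PySem.Dict.ofList page_order_map) pset pages PySem.Set.empty true

-- ===== PORT B =====
-- first_pos: 'for i, v in enumerate(vals): first_pos.setdefault(v, i)'
def bFirstPos (vals : List Int) : PySem.Dict Int Int :=
  vals.zipIdx.foldl (fun d p => PySem.Dict.setdefault d p.1 (p.2 : Int)) PySem.Dict.empty

-- first_req: 'for i, v in enumerate(vals): for k in page_order_map.get(v) or (): first_req.setdefault(k, i)'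
def bFirstReq (d : PySem.Dict Int (List Int)) (vals : List Int) : PySem.Dict Int Int :=
  vals.zipIdx.foldl
    (fun fr p => ((PySem.Dict.get? d p.1).getD []).foldl
      (fun fr k => PySem.Dict.setdefault fr k (p.2 : Int)) fr)
    PySem.Dict.empty

def is_correct_update_alt (page_order_map : List (Int × List Int)) (update : String) : Bool :=
  let pages := pvSplit update
  let vals := pages.map pvIntOf
  let n : Int := (pages.length : Int)
  let present := PySem.Set.ofList pages
  let fp := bFirstPos vals
  let fr := bFirstReq (PySem.Dict.ofList page_order_map) vals
  -- 'all(str(k) not in present or first_pos.get(k, n) < i for k, i in first_req.items())'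
  fr.items.all (fun q =>
    !(PySem.Set.contains present (PySem.Int.toStr q.1)) || decide (PySem.Dict.getD fp q.1 n < q.2))

-- ===== PRECONDITION & SPEC =====
-- Pre_ excludes updates with a non-int-parseable page (there A raises ValueError), and updates
-- containing a page whose own value occurs in that page's constraint list: on that corner A's
-- verdict depends accidentally on where the value sits in the list (the page joins printed_pages
-- mid-scan), an artefact no caller would specify either way.
def Pre_is_correct_update (page_order_map : List (Int × List Int)) (update : String) : Prop :=
  ∀ p ∈ pvSplit update, (PySem.Int.ofStr? p).isSome = true ∧
    pvIntOf p ∉ (PySem.Dict.get? (PySem.Dict.ofList page_order_map) (pvIntOf p)).getD []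
instance (page_order_map : List (Int × List Int)) (update : String) : Decidable (Pre_is_correct_update page_order_map update) := by unfold Pre_is_correct_update; infer_instance

def pvWitness_is_correct_update : (List (Int × List Int)) × String := ([(5, [3])], "3,5")

def Spec_is_correct_update (page_order_map : List (Int × List Int)) (update : String) (out : Bool) : Prop := out = is_correct_update_alt page_order_map update
instance (page_order_map : List (Int × List Int)) (update : String) (out : Bool) : Decidable (Spec_is_correct_update page_order_map update out) := by unfold Spec_is_correct_update; infer_instance

-- ===== CLAIM (what is proved, stated in full; the proofs are below) =====
def Claim_equal_is_correct_update : Prop := ∀ (page_order_map : List (Int × List Int)) (update : String), Dom_is_correct_update page_order_map update → Pre_is_correct_update page_order_map update → Spec_is_correct_update page_order_map update (is_correct_update page_order_map update)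

-- ===== LEMMAS AND PROOFS =====

-- pointwise-on-members congruence for List.any (List.any_congr needs equality on all of α)
theorem pvAnyCongrMem {α : Type} {l : List α} {p q : α → Bool}
    (h : ∀ a ∈ l, p a = q a) : l.any p = l.any q := by
  induction l with
  | nil => rfl
  | cons x xs ih =>
    simp only [List.any_cons]
    rw [h x List.mem_cons_self, ih (fun a ha => h a (List.mem_cons_of_mem _ ha))]

-- once safe is False it stays False
theorem aLoop_false (d : PySem.Dict Int (List Int)) (pset : PySem.Set String)
    (pages : List String) (printed : PySem.Set Int) :
    aLoop d pset pages printed false = false := by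
  induction pages generalizing printed with
  | nil => rfl
  | cons page rest ih =>
    simp only [aLoop]
    cases PySem.Dict.get? d (pvIntOf page) with
    | none => exact ih _
    | some L =>
      by_cases hL : L.isEmpty
      · simp [hL, ih]
      · simp [hL, ih]

theorem contains_add_ne (printed : PySem.Set Int) (v k : Int) (h : k ≠ v) :
    (PySem.Set.add printed v).contains k = printed.contains k := by
  have h1 := PySem.Set.contains_iff (PySem.Set.add printed v) k
  have h2 := PySem.Set.contains_iff printed k
  have h3 := PySem.Set.mem_add printed v k
  cases hc : printed.contains k <;> cases hca : (PySem.Set.add printed v).contains k <;>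
    simp_all

-- the inner loop's verdict, with v not in L (Pre_): the mid-scan add of v is invisible
theorem aInner_snd (pset : PySem.Set String) (v : Int) (L : List Int)
    (printed : PySem.Set Int) (hv : v ∉ L) :
    (aInner pset v L printed).2 =
      !(L.any (fun k => PySem.Set.contains pset (PySem.Int.toStr k) && !(printed.contains k))) := by
  induction L generalizing printed with
  | nil => rfl
  | cons k rest ih =>
    have hrest : v ∉ rest := fun h => hv (List.mem_cons_of_mem _ h)
    simp only [aInner, List.any_cons]
    by_cases hc : (PySem.Set.contains pset (PySem.Int.toStr k) && !(printed.contains k)) = true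
    · rw [if_pos hc, hc]; rfl
    · have hcf := eq_false_of_ne_true hc
      rw [if_neg hc, ih _ hrest, hcf, Bool.false_or]
      congr 1
      exact pvAnyCongrMem (fun x hx => by
        rw [contains_add_ne printed v x (fun h => hrest (h ▸ hx))])

-- the inner loop's printed set when it does not break
theorem aInner_fst (pset : PySem.Set String) (v : Int) (L : List Int)
    (printed : PySem.Set Int) (hv : v ∉ L) (hL : L ≠ [])
    (h : L.any (fun k => PySem.Set.contains pset (PySem.Int.toStr k) && !(printed.contains k)) = false) :
    (aInner pset v L printed).1 = PySem.Set.add printed v := by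
  induction L generalizing printed with
  | nil => exact absurd rfl hL
  | cons k rest ih =>
    have hrest : v ∉ rest := fun hh => hv (List.mem_cons_of_mem _ hh)
    rw [List.any_cons, Bool.or_eq_false_iff] at h
    simp only [aInner]
    rw [if_neg (by rw [h.1]; exact Bool.false_ne_true)]
    cases rest with
    | nil => rfl
    | cons k2 rest2 =>
      rw [ih _ hrest (by simp)]
      · exact PySem.Set.add_of_mem ((PySem.Set.mem_add printed v v).mpr (Or.inr rfl))
      · rw [← h.2]
        exact pvAnyCongrMem (fun x hx => by
          rw [contains_add_ne printed v x (fun hh => hrest (hh ▸ hx))])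

-- get? through a setdefault fold over a pair list: the FIRST pair with the key wins
theorem setdefault_fold_get? (l : List (Int × Int)) (d0 : PySem.Dict Int Int) (k : Int) :
    PySem.Dict.get? (l.foldl (fun fr q => PySem.Dict.setdefault fr q.1 q.2) d0) k
      = (d0.get? k).or ((l.find? (fun q => q.1 == k)).map (fun q => q.2)) := by
  induction l generalizing d0 with
  | nil => simp
  | cons q l ih =>
    simp only [List.foldl_cons]
    rw [ih]
    by_cases hk : q.1 = k
    · rw [List.find?_cons_of_pos (by simp [hk])]
      subst hk
      rw [PySem.Dict.get?_setdefault_self]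
      cases hd : d0.get? q.1 <;> simp
    · rw [List.find?_cons_of_neg (by simp [hk]),
        PySem.Dict.get?_setdefault_of_ne _ _ (fun h => hk h.symm)]

-- keys stay nodup through a setdefault fold
theorem setdefault_fold_nodup (l : List (Int × Int)) (d0 : PySem.Dict Int Int)
    (h : d0.keys.Nodup) :
    ((l.foldl (fun fr q => PySem.Dict.setdefault fr q.1 q.2) d0).keys).Nodup := by
  induction l generalizing d0 with
  | nil => exact h
  | cons q l ih =>
    refine ih _ ?_
    show ((PySem.Dict.setdefault d0 q.1 q.2)).keys.Nodup
    cases hc : d0.contains q.1 with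
    | true => rw [PySem.Dict.setdefault_of_contains _ _ hc]; exact h
    | false =>
      rw [PySem.Dict.setdefault_of_not_contains _ _ hc]
      exact PySem.Dict.nodup_keys_insert _ _ _ h

-- find? over an indexed list locates the first occurrence
theorem zipIdx_find? (vals : List Int) (k : Int) : ∀ s : Nat,
    (vals.zipIdx s).find? (fun p => p.1 == k)
      = (PySem.List.index? vals k).map (fun j => (k, s + j)) := by
  induction vals with
  | nil => intro s; rw [PySem.List.index?_eq_idxOf?]; simp
  | cons x xs ih =>
    intro s
    rw [List.zipIdx_cons]
    by_cases hx : x = k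
    · subst hx
      rw [List.find?_cons_of_pos (by simp), PySem.List.index?_cons_self]
      simp
    · rw [List.find?_cons_of_neg (by simp [hx]), ih (s + 1),
        PySem.List.index?_cons_of_ne _ hx]
      cases PySem.List.index? xs k with
      | none => rfl
      | some j =>
        simp only [Option.map_some, Option.some.injEq, Prod.mk.injEq]
        exact ⟨trivial, by omega⟩

theorem bFirstPos_get? (vals : List Int) (k : Int) :
    PySem.Dict.get? (bFirstPos vals) k = (PySem.List.index? vals k).map (fun j => (j : Int)) := by
  have hm : bFirstPos vals
      = (vals.zipIdx.map (fun p => (p.1, (p.2 : Int)))).foldl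
          (fun fr q => PySem.Dict.setdefault fr q.1 q.2) PySem.Dict.empty := by
    rw [List.foldl_map]; rfl
  rw [hm, setdefault_fold_get?, PySem.Dict.get?_empty, Option.none_or, List.find?_map]
  have hp : ((fun q : Int × Int => q.1 == k) ∘ fun p : Int × Nat => (p.1, (p.2 : Int)))
      = fun p : Int × Nat => p.1 == k := rfl
  rw [hp, zipIdx_find? vals k 0]
  cases PySem.List.index? vals k with
  | none => rfl
  | some j => simp

-- 'k not printed yet' (not among the first i values) = 'first position of k ≥ i'
theorem not_mem_take_iff_firstPos (vals : List Int) (k : Int) (i : Nat) (hi : i ≤ vals.length) :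
    (k ∉ vals.take i) ↔ ((i : Int) ≤ PySem.Dict.getD (bFirstPos vals) k (vals.length : Int)) := by
  rw [PySem.Dict.getD, bFirstPos_get? vals k]
  cases hidx : PySem.List.index? vals k with
  | none =>
    have hk : k ∉ vals := Iff.mp (PySem.List.index?_eq_none_iff vals k) hidx
    simp
    constructor
    · intro _; exact_mod_cast hi
    · intro _ hmem; exact hk (List.mem_of_mem_take hmem)
  | some j =>
    obtain ⟨hj, hje, hmin⟩ := PySem.List.getElem_of_index?_eq_some hidx
    simp
    constructor
    · intro hnm
      by_contra hlt
      have hji : j < i := by omega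
      have hmem : vals[j] ∈ vals.take i := by
        have hgt : (vals.take i)[j]'(by simp; omega) = vals[j] := List.getElem_take
        exact hgt ▸ List.getElem_mem _
      exact hnm (hje ▸ hmem)
    · intro hij hmem
      obtain ⟨m, hm, hme⟩ := List.getElem_of_mem hmem
      have hmi : m < i := by have := List.length_take (i := i) (l := vals); omega
      have : vals[m]'(by omega) = k := by
        rw [← hme]; exact (List.getElem_take).symm
      exact hmin m (by omega) this

-- the flattened (required value, demanding position) pairs, in scan order
def reqPairs (d : PySem.Dict Int (List Int)) : List Int → Nat → List (Int × Int)
  | [], _ => []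
  | v :: vs, s =>
    ((PySem.Dict.get? d v).getD []).map (fun k => (k, (s : Int))) ++ reqPairs d vs (s + 1)

-- bFirstReq is the setdefault fold over the flattened pair list
theorem bFirstReq_eq_fold (d : PySem.Dict Int (List Int)) (vals : List Int) : ∀ (s : Nat)
    (fr : PySem.Dict Int Int),
    (vals.zipIdx s).foldl
      (fun fr p => ((PySem.Dict.get? d p.1).getD []).foldl
        (fun fr k => PySem.Dict.setdefault fr k (p.2 : Int)) fr) fr
    = (reqPairs d vals s).foldl (fun fr q => PySem.Dict.setdefault fr q.1 q.2) fr := by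
  induction vals with
  | nil => intro s fr; rfl
  | cons v vs ih =>
    intro s fr
    rw [List.zipIdx_cons, List.foldl_cons, reqPairs, List.foldl_append, ih (s + 1),
      List.foldl_map]

-- positions recorded in reqPairs from start s are ≥ s
theorem reqPairs_snd_ge (d : PySem.Dict Int (List Int)) (vals : List Int) : ∀ (s : Nat)
    (q : Int × Int), q ∈ reqPairs d vals s → (s : Int) ≤ q.2 := by
  induction vals with
  | nil => intro s q h; exact absurd h (List.not_mem_nil)
  | cons v vs ih =>
    intro s q h
    rw [reqPairs, List.mem_append] at h
    cases h with
    | inl h =>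
      obtain ⟨k, _, hk⟩ := List.mem_map.mp h
      rw [← hk]
    | inr h => have := ih (s + 1) q h; omega

-- k ∈ L → the first element of L equal to k is k itself
theorem find?_beq_self (L : List Int) (k : Int) (h : k ∈ L) :
    L.find? (fun x => x == k) = some k := by
  induction L with
  | nil => exact absurd h (List.not_mem_nil)
  | cons x xs ih =>
    by_cases hx : x = k
    · rw [List.find?_cons_of_pos (by simp [hx]), hx]
    · rw [List.find?_cons_of_neg (by simp [hx])]
      exact ih ((List.mem_cons.mp h).resolve_left (fun hh => hx hh.symm))

-- minimality of the first recorded demand: any recorded pair is at or after it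
theorem reqPairs_find?_min (d : PySem.Dict Int (List Int)) (vals : List Int) : ∀ (s : Nat)
    (k i : Int), (k, i) ∈ reqPairs d vals s →
    ∃ i0, (reqPairs d vals s).find? (fun q => q.1 == k) = some (k, i0) ∧ i0 ≤ i := by
  induction vals with
  | nil => intro s k i h; exact absurd h (List.not_mem_nil)
  | cons v vs ih =>
    intro s k i h
    have hge := reqPairs_snd_ge d (v :: vs) s (k, i) h
    rw [reqPairs, List.find?_append, List.find?_map]
    have hp : ((fun q : Int × Int => q.1 == k) ∘ fun k' : Int => (k', (s : Int)))
        = fun k' : Int => k' == k := rfl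
    rw [hp]
    by_cases hkL : k ∈ (PySem.Dict.get? d v).getD []
    · rw [find?_beq_self _ _ hkL]
      exact ⟨(s : Int), rfl, hge⟩
    · have hnone : ((PySem.Dict.get? d v).getD []).find? (fun x => x == k) = none := by
        rw [List.find?_eq_none]
        intro x hx hbx
        exact hkL ((by simpa using hbx : x = k) ▸ hx)
      rw [hnone]
      simp only [Option.map_none, Option.none_or]
      have hmem : (k, i) ∈ reqPairs d vs (s + 1) := by
        rw [reqPairs, List.mem_append] at h
        cases h with
        | inl h =>
          obtain ⟨k', hk', he⟩ := List.mem_map.mp h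
          exact absurd ((Prod.mk.injEq _ _ _ _ ▸ he).1 ▸ hk') hkL
        | inr h => exact h
      exact ih (s + 1) k i hmem

-- the nested any over pages/constraints equals the any over the flattened pair list
theorem any_reqPairs (d : PySem.Dict Int (List Int)) (vals : List Int) (g : Int → Int → Bool) :
    ∀ s : Nat,
    (vals.zipIdx s).any (fun p => ((PySem.Dict.get? d p.1).getD []).any (fun k => g k (p.2 : Int)))
      = (reqPairs d vals s).any (fun q => g q.1 q.2) := by
  induction vals with
  | nil => intro s; rfl
  | cons v vs ih =>
    intro s
    rw [List.zipIdx_cons, List.any_cons, reqPairs, List.any_append, ih (s + 1), List.any_map]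
    rfl

-- core loop inversion: scanning all (position, demanded value) pairs equals scanning the
-- earliest-demand table once, for any per-value test monotone in the position
theorem any_eq_items_any (d : PySem.Dict Int (List Int)) (vals : List Int)
    (C : Int → Bool) (F : Int → Int) :
    (vals.zipIdx.any (fun p => ((PySem.Dict.get? d p.1).getD []).any
        (fun k => C k && decide ((p.2 : Int) ≤ F k))))
      = (bFirstReq d vals).items.any (fun q => C q.1 && decide (q.2 ≤ F q.1)) := by
  rw [any_reqPairs d vals (fun k i => C k && decide (i ≤ F k)) 0]
  have hnodup : (bFirstReq d vals).keys.Nodup := by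
    rw [bFirstReq, bFirstReq_eq_fold]
    exact setdefault_fold_nodup _ _ PySem.Dict.nodup_keys_empty
  have hget : ∀ k : Int, (bFirstReq d vals).get? k
      = ((reqPairs d vals 0).find? (fun q => q.1 == k)).map (fun q => q.2) := by
    intro k
    rw [bFirstReq, bFirstReq_eq_fold, setdefault_fold_get?, PySem.Dict.get?_empty, Option.none_or]
  cases hA : (reqPairs d vals 0).any (fun q => C q.1 && decide (q.2 ≤ F q.1)) with
  | true =>
    obtain ⟨q, hq, hg⟩ := List.any_eq_true.mp hA
    obtain ⟨i0, hfind, hle⟩ := reqPairs_find?_min d vals 0 q.1 q.2 hq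
    have hitem : (q.1, i0) ∈ (bFirstReq d vals).items :=
      PySem.Dict.mem_items_of_get?_eq_some _ (by rw [hget q.1, hfind]; rfl)
    rw [Bool.and_eq_true, decide_eq_true_eq] at hg
    exact (List.any_eq_true.mpr ⟨(q.1, i0), hitem,
      by rw [Bool.and_eq_true, decide_eq_true_eq]; exact ⟨hg.1, le_trans hle hg.2⟩⟩).symm
  | false =>
    rw [eq_comm, List.any_eq_false]
    intro q hq
    have hget? : (bFirstReq d vals).get? q.1 = some q.2 :=
      (PySem.Dict.get?_eq_some_iff_mem_items _ _ _ hnodup).mpr hq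
    rw [hget q.1] at hget?
    cases hfind : (reqPairs d vals 0).find? (fun p => p.1 == q.1) with
    | none => rw [hfind] at hget?; exact absurd hget? (by simp)
    | some r =>
      rw [hfind] at hget?
      have hr2 : r.2 = q.2 := by simpa using hget?
      have hr1 : r.1 = q.1 := by simpa using List.find?_some hfind
      have hmem : r ∈ reqPairs d vals 0 := List.mem_of_find?_eq_some hfind
      have := List.any_eq_false.mp hA r hmem
      rw [hr1, hr2] at this
      exact this

-- main invariant: from position i with printed = the values seen so far, A's loop agrees
-- with the flattened position-table formulation on the rest
theorem main_lemma (page_order_map : List (Int × List Int)) (pages : List String)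
    (suffix : List String) :
    ∀ (i : Nat) (printed : PySem.Set Int),
    pages.drop i = suffix →
    (∀ p ∈ pages, pvIntOf p ∉
      (PySem.Dict.get? (PySem.Dict.ofList page_order_map) (pvIntOf p)).getD []) →
    (∀ k, printed.contains k = true ↔ k ∈ (pages.map pvIntOf).take i) →
    aLoop (PySem.Dict.ofList page_order_map) (PySem.Set.ofList pages) suffix printed true =
    !((((pages.map pvIntOf).drop i).zipIdx i).any (fun p =>
        ((PySem.Dict.get? (PySem.Dict.ofList page_order_map) p.1).getD []).any (fun k =>
          PySem.Set.contains (PySem.Set.ofList pages) (PySem.Int.toStr k) &&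
            decide ((p.2 : Int) ≤
              PySem.Dict.getD (bFirstPos (pages.map pvIntOf)) k ((pages.length : Int)))))) := by
  induction suffix with
  | nil =>
    intro i printed hdrop _hpre _hmem
    rw [← List.map_drop, hdrop]
    rfl
  | cons page rest ih =>
    intro i printed hdrop hpre hmem
    have hi : i < pages.length := by
      by_contra hge
      rw [List.drop_eq_nil_of_le (by omega)] at hdrop
      exact List.cons_ne_nil _ _ hdrop.symm
    have hcons : pages.drop i = pages[i] :: pages.drop (i + 1) := List.drop_eq_getElem_cons hi
    rw [hdrop] at hcons
    have hpage : pages[i] = page := (List.cons.injEq _ _ _ _ ▸ hcons.symm).1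
    have hrest : pages.drop (i + 1) = rest := (List.cons.injEq _ _ _ _ ▸ hcons.symm).2
    have hvlen : (pages.map pvIntOf).length = pages.length := List.length_map _
    have hvi : (pages.map pvIntOf)[i]'(by omega) = pvIntOf page := by
      rw [List.getElem_map]; rw [hpage]
    have hvdrop : (pages.map pvIntOf).drop i =
        pvIntOf page :: (pages.map pvIntOf).drop (i + 1) := by
      rw [List.drop_eq_getElem_cons (by omega), hvi]
    -- membership in the printed set after adding this page's value
    have hmem' : ∀ k, ((PySem.Set.add printed (pvIntOf page)).contains k = true) ↔
        k ∈ (pages.map pvIntOf).take (i + 1) := by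
      intro k
      have htake : (pages.map pvIntOf).take (i + 1) =
          (pages.map pvIntOf).take i ++ [pvIntOf page] := by
        rw [List.take_add_one, List.getElem?_eq_getElem (by omega), hvi]
        rfl
      by_cases hk : k = pvIntOf page
      · subst hk
        constructor
        · intro _; rw [htake]; exact List.mem_append_right _ List.mem_cons_self
        · intro _
          exact (PySem.Set.contains_iff _ _).mpr
            ((PySem.Set.mem_add printed _ _).mpr (Or.inr rfl))
      · rw [contains_add_ne printed _ k hk, hmem k, htake]
        simp [hk]
    -- the per-constraint check agrees: 'not printed yet' = 'first position ≥ i'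
    have hpoint : ∀ k : Int,
        (PySem.Set.contains (PySem.Set.ofList pages) (PySem.Int.toStr k) && !(printed.contains k)) =
        (PySem.Set.contains (PySem.Set.ofList pages) (PySem.Int.toStr k) &&
          decide ((i : Int) ≤
            PySem.Dict.getD (bFirstPos (pages.map pvIntOf)) k ((pages.length : Int)))) := by
      intro k
      have hbr := not_mem_take_iff_firstPos (pages.map pvIntOf) k i (by omega)
      rw [hvlen] at hbr
      have hm := hmem k
      cases hc : printed.contains k with
      | true =>
        have : k ∈ (pages.map pvIntOf).take i := hm.mp hc
        have : ¬ ((i : Int) ≤ PySem.Dict.getD (bFirstPos (pages.map pvIntOf)) k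
            ((pages.length : Int))) := fun hle => (hbr.mpr hle) this
        simp [this]
      | false =>
        have hnm : k ∉ (pages.map pvIntOf).take i := fun hmm => by
          rw [hm.mpr hmm] at hc; exact Bool.noConfusion hc
        simp [hbr.mp hnm]
    rw [hvdrop, List.zipIdx_cons, List.any_cons]
    simp only [aLoop]
    have hpmem : page ∈ pages := List.mem_of_mem_drop (hdrop ▸ List.mem_cons_self)
    have hvnotin := hpre page hpmem
    cases hget : PySem.Dict.get? (PySem.Dict.ofList page_order_map) (pvIntOf page) with
    | none =>
      change aLoop (PySem.Dict.ofList page_order_map) (PySem.Set.ofList pages) rest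
        (printed.add (pvIntOf page)) true = _
      rw [ih (i + 1) _ hrest hpre hmem']
      simp
    | some L =>
      rw [hget] at hvnotin
      cases L with
      | nil =>
        change aLoop (PySem.Dict.ofList page_order_map) (PySem.Set.ofList pages) rest
          (printed.add (pvIntOf page)) true = _
        rw [ih (i + 1) _ hrest hpre hmem']
        simp
      | cons k0 L0 =>
        change aLoop (PySem.Dict.ofList page_order_map) (PySem.Set.ofList pages) rest
          (aInner (PySem.Set.ofList pages) (pvIntOf page) (k0 :: L0) printed).1
          (if (aInner (PySem.Set.ofList pages) (pvIntOf page) (k0 :: L0) printed).2 = true then true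
           else false) = _
        have hsnd := aInner_snd (PySem.Set.ofList pages) (pvIntOf page) (k0 :: L0) printed
          (by simpa using hvnotin)
        have hanyeq : ((k0 :: L0).any (fun k =>
            PySem.Set.contains (PySem.Set.ofList pages) (PySem.Int.toStr k) &&
              !(printed.contains k))) =
            ((k0 :: L0).any (fun k =>
              PySem.Set.contains (PySem.Set.ofList pages) (PySem.Int.toStr k) &&
                decide ((i : Int) ≤
                  PySem.Dict.getD (bFirstPos (pages.map pvIntOf)) k ((pages.length : Int))))) :=
          List.any_congr rfl (fun k => hpoint k)
        cases hany : ((k0 :: L0).any (fun k =>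
            PySem.Set.contains (PySem.Set.ofList pages) (PySem.Int.toStr k) &&
              !(printed.contains k))) with
        | true =>
          rw [hany] at hsnd
          rw [hsnd]
          simp only [Bool.not_true, Bool.false_eq_true, if_false]
          rw [aLoop_false]
          simp only [Option.getD_some]
          rw [← hanyeq, hany]
          simp
        | false =>
          rw [hany] at hsnd
          rw [hsnd]
          simp only [Bool.not_false, if_true]
          have hfst := aInner_fst (PySem.Set.ofList pages) (pvIntOf page) (k0 :: L0) printed
            (by simpa using hvnotin) (by simp) hany
          rw [hfst, ih (i + 1) _ hrest hpre hmem']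
          simp only [Option.getD_some]
          rw [← hanyeq, hany]
          simp

-- ===== VERDICT (by name: the statement is the Claim_ definition above) =====
theorem is_correct_update_spec : Claim_equal_is_correct_update := by
  intro page_order_map update _hdom hpre
  unfold Spec_is_correct_update
  simp only [is_correct_update, is_correct_update_alt]
  rw [main_lemma page_order_map (pvSplit update) (pvSplit update) 0 PySem.Set.empty
    List.drop_zero (fun p hp => (hpre p hp).2)
    (fun k => by simp [PySem.Set.empty, PySem.Set.contains])]
  rw [List.drop_zero,
    any_eq_items_any (PySem.Dict.ofList page_order_map) ((pvSplit update).map pvIntOf)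
      (fun k => PySem.Set.contains (PySem.Set.ofList (pvSplit update)) (PySem.Int.toStr k))
      (fun k => PySem.Dict.getD (bFirstPos ((pvSplit update).map pvIntOf)) k
        (((pvSplit update).length : Int))),
    List.all_eq_not_any_not]
  congr 1
  refine pvAnyCongrMem (fun q _ => ?_)
  cases hC : PySem.Set.contains (PySem.Set.ofList (pvSplit update)) (PySem.Int.toStr q.1) <;>
    by_cases hF : PySem.Dict.getD (bFirstPos ((pvSplit update).map pvIntOf)) q.1
        (((pvSplit update).length : Int)) < q.2 <;>
      simp [hF, le_of_not_gt]
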